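-- pv_equiv track=rewrite | github.com/ramanflorfresca/antar-fastapi | antar_engine/yogas.py | yogas_to_prompt_block
-- ===== SOURCE A (Python) =====
-- def yogas_to_prompt_block(yogas: list) -> str:
--     """Format yogas into a concise LLM prompt block."""
--     if not yogas:
--         return "YOGAS: No major yogas detected."
--
--     strong   = [y for y in yogas if y["strength"] == "strong"]
--     moderate = [y for y in yogas if y["strength"] == "moderate"]
--
--     lines = ["YOGAS PRESENT IN THIS CHART:"]
--
--     if strong:
--         lines.append("  STRONG YOGAS (highest impact):")
--         for y in strong:
--             lines.append(f"    • {y['name']}: {y['effect']}")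
--
--     if moderate:
--         lines.append("  MODERATE YOGAS:")
--         for y in moderate[:4]:  # cap at 4 to avoid prompt bloat
--             lines.append(f"    • {y['name']}: {y['effect']}")
--
--     challenge = [y for y in yogas if y.get("category") == "challenge"]
--     if challenge:
--         lines.append("  CHALLENGES:")
--         for y in challenge:
--             lines.append(f"    • {y['name']}: {y['effect']}")
--
--     return "\n".join(lines)
-- ===== SOURCE B (Python) =====
-- def yogas_to_prompt_block(yogas: list) -> str:
--     """Format yogas into a concise LLM prompt block.
--
--     Single streaming pass: each yoga is formatted at most once and appended
--     directly to per-section string accumulators (no intermediate filtered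
--     lists, no slice, no join); the moderate cap counts down during the pass.
--     """
--     if not yogas:
--         return "YOGAS: No major yogas detected."
--
--     s = m = c = ""
--     mod_left = 4
--     for y in yogas:
--         st = y["strength"]
--         is_ch = y.get("category") == "challenge"
--         take_mod = st == "moderate" and mod_left > 0
--         if st == "strong" or take_mod or is_ch:
--             line = "\n    \u2022 %s: %s" % (y["name"], y["effect"])
--             if st == "strong":
--                 s += line
--             if take_mod:
--                 m += line
--                 mod_left -= 1
--             if is_ch:
--                 c += line
--
--     out = "YOGAS PRESENT IN THIS CHART:"
--     if s:
--         out += "\n  STRONG YOGAS (highest impact):" + s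
--     if m:
--         out += "\n  MODERATE YOGAS:" + m
--     if c:
--         out += "\n  CHALLENGES:" + c
--     return out
-- ===== Notes on version B (the rewrite author's own statement) =====
-- stated objective: alternative
-- what changed: A's three filter comprehensions, a moderate[:4] slice and a lines-list joined at the end are replaced by one streaming pass that formats each qualifying yoga at most once and appends it directly to three per-section string accumulators, with the moderate cap enforced by a countdown during the pass; the result is assembled by conditional string concatenation, with no intermediate lists and no join.
import Mathlib
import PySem

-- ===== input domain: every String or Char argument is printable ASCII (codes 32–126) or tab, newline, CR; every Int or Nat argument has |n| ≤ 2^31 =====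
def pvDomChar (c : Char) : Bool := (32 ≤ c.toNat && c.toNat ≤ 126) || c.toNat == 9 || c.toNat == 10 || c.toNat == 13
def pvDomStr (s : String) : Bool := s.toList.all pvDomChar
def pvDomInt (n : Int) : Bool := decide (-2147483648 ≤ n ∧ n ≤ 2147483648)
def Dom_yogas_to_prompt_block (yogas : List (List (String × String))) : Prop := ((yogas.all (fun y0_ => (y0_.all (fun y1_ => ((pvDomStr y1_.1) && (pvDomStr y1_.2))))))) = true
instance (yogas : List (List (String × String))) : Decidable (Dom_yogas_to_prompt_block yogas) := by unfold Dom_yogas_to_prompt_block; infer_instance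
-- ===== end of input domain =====

-- B replaces A's three filter passes + lines list + join by one streaming pass with three
-- string accumulators and a countdown moderate cap (objective: alternative, same cost).

-- ===== PORT A =====
-- y[k] for a dict y: first-match lookup; Pre_ guarantees the key is present, '' is never read.
def pvGetA (y : List (String × String)) (k : String) : String :=
  ((PySem.Dict.mk y).get? k).getD ""

-- f"    • {y['name']}: {y['effect']}"
def pvLineA (y : List (String × String)) : String :=
  "    • " ++ pvGetA y "name" ++ ": " ++ pvGetA y "effect"

def yogas_to_prompt_block (yogas : List (List (String × String))) : String :=
  if yogas = [] then "YOGAS: No major yogas detected."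
  else
    let strong := yogas.filter (fun y => pvGetA y "strength" == "strong")
    let moderate := yogas.filter (fun y => pvGetA y "strength" == "moderate")
    let lines1 := ["YOGAS PRESENT IN THIS CHART:"]
    let lines2 := if strong.isEmpty then lines1
      else lines1 ++ ("  STRONG YOGAS (highest impact):" :: strong.map pvLineA)
    -- moderate[:4] with a literal nonnegative bound is List.take 4 (exact)
    let lines3 := if moderate.isEmpty then lines2
      else lines2 ++ ("  MODERATE YOGAS:" :: (moderate.take 4).map pvLineA)
    let challenge := yogas.filter (fun y => (PySem.Dict.mk y).get? "category" == some "challenge")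
    let lines4 := if challenge.isEmpty then lines3
      else lines3 ++ ("  CHALLENGES:" :: challenge.map pvLineA)
    PySem.Str.join "\n" lines4

-- ===== PORT B =====
-- B's "\n    • %s: %s" % (…); the dict lookup helper pvGetA is shared by both ports.
def pvLineB (y : List (String × String)) : String :=
  "\n    • " ++ pvGetA y "name" ++ ": " ++ pvGetA y "effect"

-- Source B's loop: state (s, m, c, mod_left). mod_left starts at 4 and is decremented only when
-- positive, so Python's int counter is exactly this Nat.
def pvStep (acc : String × String × String × Nat) (y : List (String × String)) :
    String × String × String × Nat :=
  let st := pvGetA y "strength"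
  let isCh := (PySem.Dict.mk y).get? "category" == some "challenge"
  let takeMod := st == "moderate" && acc.2.2.2 != 0
  if st == "strong" || takeMod || isCh then
    let line := pvLineB y
    let s := if st == "strong" then acc.1 ++ line else acc.1
    let m := if takeMod then acc.2.1 ++ line else acc.2.1
    let left := if takeMod then acc.2.2.2 - 1 else acc.2.2.2
    let c := if isCh then acc.2.2.1 ++ line else acc.2.2.1
    (s, m, c, left)
  else acc

def yogas_to_prompt_block_alt (yogas : List (List (String × String))) : String :=
  if yogas = [] then "YOGAS: No major yogas detected."
  else
    let r := yogas.foldl pvStep ("", "", "", 4)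
    let out1 := "YOGAS PRESENT IN THIS CHART:"
    let out2 := if r.1 != "" then out1 ++ "\n  STRONG YOGAS (highest impact):" ++ r.1 else out1
    let out3 := if r.2.1 != "" then out2 ++ "\n  MODERATE YOGAS:" ++ r.2.1 else out2
    let out4 := if r.2.2.1 != "" then out3 ++ "\n  CHALLENGES:" ++ r.2.2.1 else out3
    out4

-- ===== PRECONDITION & SPEC =====
-- Pre_ excludes exactly the inputs where Python A raises KeyError: some yoga lacks "strength",
-- or a yoga that gets printed (strong, one of the first four moderate, or challenge) lacks "name"/"effect".
def Pre_yogas_to_prompt_block (yogas : List (List (String × String))) : Prop :=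
  (∀ y ∈ yogas, ((PySem.Dict.mk y).get? "strength").isSome = true) ∧
  (∀ y ∈ yogas,
    ((PySem.Dict.mk y).get? "strength" = some "strong" ∨ (PySem.Dict.mk y).get? "category" = some "challenge") →
    ((PySem.Dict.mk y).get? "name").isSome = true ∧ ((PySem.Dict.mk y).get? "effect").isSome = true) ∧
  (∀ y ∈ (yogas.filter (fun y => (PySem.Dict.mk y).get? "strength" == some "moderate")).take 4,
    ((PySem.Dict.mk y).get? "name").isSome = true ∧ ((PySem.Dict.mk y).get? "effect").isSome = true)
instance (yogas : List (List (String × String))) : Decidable (Pre_yogas_to_prompt_block yogas) := by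
  unfold Pre_yogas_to_prompt_block; infer_instance

def pvWitness_yogas_to_prompt_block : (List (List (String × String))) :=
  [[("strength", "strong"), ("name", "Gajakesari"), ("effect", "fame")],
   [("strength", "weak"), ("category", "challenge"), ("name", "Kemadruma"), ("effect", "isolation")]]

def Spec_yogas_to_prompt_block (yogas : List (List (String × String))) (out : String) : Prop := out = yogas_to_prompt_block_alt yogas
instance (yogas : List (List (String × String))) (out : String) : Decidable (Spec_yogas_to_prompt_block yogas out) := by unfold Spec_yogas_to_prompt_block; infer_instance

-- ===== CLAIM (what is proved, stated in full; the proofs are below) =====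
def Claim_equal_yogas_to_prompt_block : Prop := ∀ (yogas : List (List (String × String))), Dom_yogas_to_prompt_block yogas → Pre_yogas_to_prompt_block yogas → Spec_yogas_to_prompt_block yogas (yogas_to_prompt_block yogas)

-- ===== LEMMAS AND PROOFS =====

-- concatenation of B's per-section lines over a list of yogas
def pvCat (l : List (List (String × String))) : String :=
  l.foldl (fun a y => a ++ pvLineB y) ""

theorem pvCat_go (l : List (List (String × String))) (a : String) :
    l.foldl (fun a y => a ++ pvLineB y) a = a ++ pvCat l := by
  induction l generalizing a with
  | nil => simp [pvCat]
  | cons y t ih =>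
    have h2 : pvCat (y :: t) = pvLineB y ++ pvCat t := by
      show List.foldl _ ("" ++ pvLineB y) t = _
      rw [ih]; simp
    show List.foldl _ (a ++ pvLineB y) t = a ++ pvCat (y :: t)
    rw [ih, h2, String.append_assoc]

theorem pvCat_cons (y : List (String × String)) (l : List (List (String × String))) :
    pvCat (y :: l) = pvLineB y ++ pvCat l := by
  show List.foldl _ ("" ++ pvLineB y) l = _
  rw [pvCat_go]; simp

theorem pvLineB_toList (y : List (String × String)) :
    (pvLineB y).toList = '\n' :: (pvLineA y).toList := by
  have h : ("\n    • " : String).toList = '\n' :: ("    • " : String).toList := by decide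
  simp [pvLineB, pvLineA, h]

theorem pvCat_toList (l : List (List (String × String))) :
    (pvCat l).toList = (l.map (fun y => '\n' :: (pvLineA y).toList)).flatten := by
  induction l with
  | nil => simp [pvCat]
  | cons y t ih => simp [pvCat_cons, ih, pvLineB_toList]

theorem pvCat_eq_empty_iff (l : List (List (String × String))) :
    (pvCat l = "") ↔ l = [] := by
  constructor
  · intro h
    cases l with
    | nil => rfl
    | cons y t =>
      have := congrArg String.toList h
      simp [pvCat_toList] at this
  · intro h; simp [h, pvCat]

theorem pvStep_invariant (ys : List (List (String × String)))
    (s m c : String) (left : Nat) :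
    ys.foldl pvStep (s, m, c, left) =
    (s ++ pvCat (ys.filter (fun y => pvGetA y "strength" == "strong")),
     m ++ pvCat ((ys.filter (fun y => pvGetA y "strength" == "moderate")).take left),
     c ++ pvCat (ys.filter (fun y => (PySem.Dict.mk y).get? "category" == some "challenge")),
     left - (ys.filter (fun y => pvGetA y "strength" == "moderate")).length) := by
  induction ys generalizing s m c left with
  | nil => simp [pvCat]
  | cons y t ih =>
    have hsm : ¬ ((pvGetA y "strength" == "strong") = true ∧ (pvGetA y "strength" == "moderate") = true) := by
      rintro ⟨h1, h2⟩
      simp only [beq_iff_eq] at h1 h2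
      rw [h1] at h2; exact absurd h2 (by decide)
    simp only [List.foldl_cons, List.filter_cons, pvStep]
    by_cases hs : (pvGetA y "strength" == "strong") = true <;>
      by_cases hm : (pvGetA y "strength" == "moderate") = true <;>
      by_cases hc : ((PySem.Dict.mk y).get? "category" == some "challenge") = true
    · exact absurd ⟨hs, hm⟩ hsm
    · exact absurd ⟨hs, hm⟩ hsm
    all_goals cases left with
      | zero =>
        simp only [hs, hm, hc] <;>
        simp [ih, pvCat_cons, String.append_assoc]
      | succ k =>
        simp only [hs, hm, hc] <;>
        simp [ih, pvCat_cons, String.append_assoc, List.take_succ_cons,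
          Nat.succ_sub_succ]

-- "\n".join over a nonempty char-list list: head, then '\n'-prefixed tail entries
theorem pvJoinChars (l : List (List Char)) (x : List Char) :
    PySem.Chars.join ['\n'] (x :: l) = x ++ (l.map (fun t => '\n' :: t)).flatten := by
  induction l generalizing x with
  | nil => simp [PySem.Chars.join_singleton]
  | cons q rest ih =>
    rw [PySem.Chars.join_cons_cons, ih]
    simp [List.append_assoc]

-- ===== VERDICT (by name: the statement is the Claim_ definition above) =====
theorem yogas_to_prompt_block_spec : Claim_equal_yogas_to_prompt_block := by
  intro yogas _ _
  unfold Spec_yogas_to_prompt_block yogas_to_prompt_block yogas_to_prompt_block_alt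
  by_cases h : yogas = []
  · simp [h]
  · simp only [if_neg h, pvStep_invariant, String.empty_append]
    set strongF := yogas.filter (fun y => pvGetA y "strength" == "strong") with hS
    set modF := yogas.filter (fun y => pvGetA y "strength" == "moderate") with hM
    set chF := yogas.filter (fun y => (PySem.Dict.mk y).get? "category" == some "challenge") with hC
    have hm4 : (modF.take 4 = []) ↔ modF = [] := by
      rw [List.take_eq_nil_iff]; simp
    rw [← String.toList_inj]
    by_cases hs : strongF = [] <;> by_cases hmm : modF = [] <;> by_cases hcc : chF = [] <;>
      simp [hs, hmm, hcc, hm4, pvCat_eq_empty_iff, List.isEmpty_iff, bne_iff_ne, ne_eq,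
        PySem.Str.toList_join, pvJoinChars, pvCat_toList, List.map_map, Function.comp_def,
        String.toList_append, List.append_assoc,
        (by decide : ("\n  STRONG YOGAS (highest impact):" : String).toList =
          '\n' :: ("  STRONG YOGAS (highest impact):" : String).toList),
        (by decide : ("\n  MODERATE YOGAS:" : String).toList =
          '\n' :: ("  MODERATE YOGAS:" : String).toList),
        (by decide : ("\n  CHALLENGES:" : String).toList =
          '\n' :: ("  CHALLENGES:" : String).toList)]
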